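-- pv_equiv track=rewrite | github.com/ai-kmu/etc | algorithm/2020/0228/yun_hyeok.py | solution
-- ===== SOURCE A (Python) =====
-- def solution(words):
--     word_dict = build_dict(words)
--     total_num = 0
--     for word in words:
--         for i in range(len(word)):
--             if len(word_dict[word[:i+1]]) == 1:
--                 total_num += i + 1
--                 break
--         else:
--             total_num += len(word)
--
--     return total_num
--
-- def build_dict(words):
--     d = {}
--     for word in words:
--         for i in range(len(word)):
--             if not d.get(word[:i+1]):
--                 d[word[:i+1]] = [word]
--             else:
--                 d[word[:i+1]].append(word)
--     return d
-- ===== SOURCE B (Python) =====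
-- def _lcp(a, b):
--     n = 0
--     while n < len(a) and n < len(b) and a[n] == b[n]:
--         n += 1
--     return n
--
--
-- def solution(words):
--     total = 0
--     for i, w in enumerate(words):
--         m = 0
--         for j, v in enumerate(words):
--             if j != i:
--                 m = max(m, _lcp(w, v))
--         total += min(len(w), m + 1)
--     return total
-- ===== Notes on version B (the rewrite author's own statement) =====
-- stated objective: alternative
-- what changed: Replaces the prefix->word-list dictionary plus per-word prefix rescanning by a dictionary-free pairwise longest-common-prefix computation: each word's keystroke count is min(len(w), 1 + max LCP with any other word).
import Mathlib
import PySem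

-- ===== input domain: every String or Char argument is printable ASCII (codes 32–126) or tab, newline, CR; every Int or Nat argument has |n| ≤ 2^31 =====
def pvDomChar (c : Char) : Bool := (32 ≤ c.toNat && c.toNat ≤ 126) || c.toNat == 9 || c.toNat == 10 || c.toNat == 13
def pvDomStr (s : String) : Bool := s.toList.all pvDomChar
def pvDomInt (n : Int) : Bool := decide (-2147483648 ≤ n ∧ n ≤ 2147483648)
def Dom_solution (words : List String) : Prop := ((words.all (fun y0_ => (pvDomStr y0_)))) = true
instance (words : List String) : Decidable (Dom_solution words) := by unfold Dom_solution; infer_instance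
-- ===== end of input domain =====

-- B replaces A's prefix->word-list dictionary by a dictionary-free pairwise max-LCP
-- computation (per word: min(len w, 1 + max LCP with any other word)); objective: alternative.

-- ===== PORT A =====
-- build_dict: for each word, for i in range(len(word)): append word at key word[:i+1]
-- (strings handled on the List Char side per PySem convention)
def buildStep (d : PySem.Dict (List Char) (List (List Char))) (w : List Char) (i : Nat) :
    PySem.Dict (List Char) (List (List Char)) :=
  let p := PySem.List.slice w none (some ((i : Int) + 1))   -- word[:i+1]
  match d.get? p with
  | none => d.insert p [w]                                   -- "if not d.get(...)": missing key
  | some l => if l = [] then d.insert p [w] else d.insert p (l ++ [w])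

def buildDict (ws : List (List Char)) : PySem.Dict (List Char) (List (List Char)) :=
  ws.foldl (fun d w => (List.range w.length).foldl (fun d i => buildStep d w i) d) PySem.Dict.empty

-- inner loop of solution with break/else; the key word[:i+1] is always present
-- (the word itself was appended there), so getD's default [] is unreachable
def aLoop (d : PySem.Dict (List Char) (List (List Char))) (w : List Char) (t : Nat) : Int :=
  if t < w.length then
    if (d.getD (PySem.List.slice w none (some ((t : Int) + 1))) []).length = 1 then (t : Int) + 1
    else aLoop d w (t + 1)
  else (w.length : Int)                                      -- for-else: total_num += len(word)
termination_by w.length - t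

def solution (words : List String) : Int :=
  let ws := words.map String.toList
  let d := buildDict ws
  ws.foldl (fun total w => total + aLoop d w 0) 0

-- ===== PORT B =====
def lcp : List Char → List Char → Nat
  | a :: as, b :: bs => if a = b then lcp as bs + 1 else 0
  | _, _ => 0

def solution_alt (words : List String) : Int :=
  let ws := words.map String.toList
  (PySem.List.enumerate ws).foldl (fun total p =>
    let m := (PySem.List.enumerate ws).foldl (fun m q =>
      if q.1 ≠ p.1 then max m ((lcp p.2 q.2 : Int)) else m) 0
    total + min ((p.2.length : Int)) (m + 1)) 0

-- ===== PRECONDITION & SPEC =====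
def Spec_solution (words : List String) (out : Int) : Prop := out = solution_alt words
instance (words : List String) (out : Int) : Decidable (Spec_solution words out) := by unfold Spec_solution; infer_instance

-- ===== CLAIM (what is proved, stated in full; the proofs are below) =====
def Claim_equal_solution : Prop := ∀ (words : List String), Dom_solution words → Spec_solution words (solution words)

-- ===== LEMMAS AND PROOFS =====

-- the slice word[:i+1] is take (i+1)
theorem slice_succ (w : List Char) (i : Nat) :
    PySem.List.slice w none (some ((i : Int) + 1)) = w.take (i + 1) := by
  have h : ((i : Int) + 1) = ((i + 1 : Nat) : Int) := by push_cast; ring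
  rw [h, PySem.List.slice_to_natCast]

-- one buildStep appends w at key take (i+1), in the getD view
theorem buildStep_getD (d : PySem.Dict (List Char) (List (List Char))) (w p : List Char) (i : Nat) :
    (buildStep d w i).getD p [] =
      if p = w.take (i + 1) then d.getD p [] ++ [w] else d.getD p [] := by
  unfold buildStep
  rw [slice_succ]
  have hstep : (match d.get? (w.take (i + 1)) with
      | none => d.insert (w.take (i + 1)) [w]
      | some l => if l = [] then d.insert (w.take (i + 1)) [w]
                  else d.insert (w.take (i + 1)) (l ++ [w]))
      = d.insert (w.take (i + 1)) (d.getD (w.take (i + 1)) [] ++ [w]) := by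
    rcases h : d.get? (w.take (i + 1)) with _ | l
    · simp [PySem.Dict.getD_eq_get?_getD, h]
    · rcases eq_or_ne l [] with rfl | hl
      · simp [PySem.Dict.getD_eq_get?_getD, h]
      · simp [PySem.Dict.getD_eq_get?_getD, h, hl]
  rw [hstep, PySem.Dict.getD_insert]
  split_ifs with hp
  · rw [hp]
  · rfl

theorem inner_getD (w p : List Char) (hp : p ≠ []) :
    ∀ (n : Nat), n ≤ w.length → ∀ d,
    ((List.range n).foldl (fun d i => buildStep d w i) d).getD p [] =
      d.getD p [] ++ (if p <+: w ∧ p.length ≤ n then [w] else []) := by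
  intro n
  induction n with
  | zero =>
    intro _ d
    rw [if_neg, List.append_nil]
    · simp
    · rintro ⟨-, hlen⟩
      exact hp (List.eq_nil_of_length_eq_zero (Nat.le_zero.mp hlen))
  | succ n ih =>
    intro hn d
    rw [List.range_succ, List.foldl_append, List.foldl_cons, List.foldl_nil,
        buildStep_getD, ih (by omega) d]
    by_cases hq : p = w.take (n + 1)
    · have hlen : p.length = n + 1 := by rw [hq, List.length_take]; omega
      have hpre : p <+: w := hq ▸ List.take_prefix _ _
      rw [if_pos hq, if_neg (by rintro ⟨-, h⟩; omega), if_pos ⟨hpre, by omega⟩, List.append_nil]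
    · rw [if_neg hq]
      by_cases hc : p <+: w ∧ p.length ≤ n + 1
      · have : p.length ≤ n := by
          rcases Nat.lt_or_ge p.length (n + 1) with h | h
          · omega
          · exfalso; apply hq
            have h2 : p = w.take p.length := List.prefix_iff_eq_take.mp hc.1
            rw [h2]; congr 1; omega
        rw [if_pos ⟨hc.1, this⟩, if_pos hc]
      · have : ¬(p <+: w ∧ p.length ≤ n) := fun h => hc ⟨h.1, by omega⟩
        rw [if_neg this, if_neg hc]

theorem build_getD (ws : List (List Char)) (p : List Char) (hp : p ≠ []) :
    (buildDict ws).getD p [] = ws.filter (fun v => p.isPrefixOf v) := by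
  unfold buildDict
  suffices H : ∀ d, (ws.foldl (fun d w => (List.range w.length).foldl (fun d i => buildStep d w i) d) d).getD p []
      = d.getD p [] ++ ws.filter (fun v => p.isPrefixOf v) by
    simpa [PySem.Dict.getD_empty] using H PySem.Dict.empty
  induction ws with
  | nil => simp
  | cons w ws ih =>
    intro d
    rw [List.foldl_cons, ih, inner_getD w p hp w.length le_rfl d, List.filter_cons]
    by_cases hpre : p <+: w
    · have hle : p.length ≤ w.length := hpre.length_le
      simp [hpre, List.isPrefixOf_iff_prefix, hle]
    · simp [hpre, List.isPrefixOf_iff_prefix]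

-- lcp characterisation: for k within a, k ≤ lcp a b ↔ the first k chars agree
theorem le_lcp_iff (a : List Char) : ∀ (b : List Char) (k : Nat), k ≤ a.length →
    (k ≤ lcp a b ↔ a.take k = b.take k) := by
  induction a with
  | nil =>
    intro b k hk
    have hk0 : k = 0 := by simpa using hk
    subst hk0; simp
  | cons x as ih =>
    intro b k hk
    cases b with
    | nil =>
      cases k with
      | zero => simp
      | succ k => simp [lcp]
    | cons y bs =>
      cases k with
      | zero => simp
      | succ k =>
        simp only [lcp, List.take_succ_cons, List.cons.injEq]
        split_ifs with hxy
        · subst hxy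
          rw [Nat.succ_le_succ_iff, ih bs k (by simpa using hk)]
          simp
        · constructor
          · omega
          · rintro ⟨rfl, -⟩; exact absurd rfl hxy

theorem take_isPrefixOf_iff (w v : List Char) (k : Nat) (hk : k ≤ w.length) :
    ((w.take k).isPrefixOf v = true) ↔ k ≤ lcp w v := by
  rw [List.isPrefixOf_iff_prefix, List.prefix_iff_eq_take, List.length_take,
      Nat.min_eq_left hk, le_lcp_iff w v k hk]

-- filter length = 1 at a position where the predicate holds ⟺ it fails everywhere else
theorem filter_length_one_iff {a : Type} (l : List a) (P : a → Bool) (i : Nat)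
    (hi : i < l.length) (hP : P l[i] = true) :
    (l.filter P).length = 1 ↔ ∀ j (hj : j < l.length), j ≠ i → P (l[j]'hj) = false := by
  have hsplit : l = l.take i ++ l[i] :: l.drop (i + 1) := by
    conv_lhs => rw [← List.take_append_drop i l]
    congr 1
    exact (List.getElem_cons_drop hi).symm
  constructor
  · intro h1 j hj hji
    by_contra hPj
    have hPj' : P (l[j]'hj) = true := by
      cases h : P (l[j]'hj)
      · exact absurd h hPj
      · rfl
    rw [hsplit, List.filter_append, List.filter_cons_of_pos hP,
        List.length_append, List.length_cons] at h1
    rcases Nat.lt_or_ge j i with hlt | hge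
    · have hjmem : l[j]'hj ∈ l.take i := by
        have hjl : j < (l.take i).length := by simp [hi.le]; omega
        have he : (l.take i)[j]'hjl = l[j]'hj := List.getElem_take
        exact he ▸ List.getElem_mem hjl
      have hmem : l[j]'hj ∈ (l.take i).filter P := List.mem_filter.mpr ⟨hjmem, hPj'⟩
      have := List.length_pos_of_mem hmem
      omega
    · have hgt : i < j := by omega
      have hjmem : l[j]'hj ∈ l.drop (i + 1) := by
        have hlt2 : j - (i + 1) < (l.drop (i + 1)).length := by simp; omega
        have he : (l.drop (i + 1))[j - (i + 1)]'hlt2 = l[j]'hj := by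
          rw [List.getElem_drop]; congr 1; omega
        exact he ▸ List.getElem_mem hlt2
      have hmem : l[j]'hj ∈ (l.drop (i + 1)).filter P := List.mem_filter.mpr ⟨hjmem, hPj'⟩
      have := List.length_pos_of_mem hmem
      omega
  · intro h
    rw [hsplit, List.filter_append, List.filter_cons_of_pos hP,
        List.length_append, List.length_cons]
    have h1 : (l.take i).filter P = [] := by
      rw [List.filter_eq_nil_iff]
      intro x hx
      rcases List.mem_iff_getElem.mp hx with ⟨j, hj, rfl⟩
      have hji : j < i := by have := hj; simp at this; omega
      have hj' : j < l.length := by omega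
      have he : (l.take i)[j]'hj = l[j]'hj' := List.getElem_take
      rw [he, h j hj' (by omega)]
      simp
    have h2 : (l.drop (i + 1)).filter P = [] := by
      rw [List.filter_eq_nil_iff]
      intro x hx
      rcases List.mem_iff_getElem.mp hx with ⟨j, hj, rfl⟩
      have hj' : i + 1 + j < l.length := by have := hj; simp at this; omega
      have he : (l.drop (i + 1))[j]'hj = l[i + 1 + j]'hj' := List.getElem_drop
      rw [he, h (i + 1 + j) hj' (by omega)]
      simp
    simp [h1, h2]

-- the max-fold in B: result < k ↔ start < k and every counted lcp < k
theorem fold_max_lt (l : List (Int × List Char)) (i : Int) (w : List Char) (m0 k : Int) :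
    (l.foldl (fun m q => if q.1 ≠ i then max m ((lcp w q.2 : Int)) else m) m0) < k ↔
      m0 < k ∧ ∀ q ∈ l, q.1 ≠ i → ((lcp w q.2 : Int)) < k := by
  induction l generalizing m0 with
  | nil => simp
  | cons q l ih =>
    simp only [List.foldl_cons, List.mem_cons]
    by_cases hq : q.1 ≠ i
    · rw [if_pos hq, ih, max_lt_iff]
      constructor
      · rintro ⟨⟨h0, hl⟩, hrest⟩
        refine ⟨h0, ?_⟩
        rintro r (rfl | hr) hri
        · exact hl
        · exact hrest r hr hri
      · rintro ⟨h0, hall⟩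
        exact ⟨⟨h0, hall q (Or.inl rfl) hq⟩, fun r hr hri => hall r (Or.inr hr) hri⟩
    · rw [if_neg hq, ih]
      constructor
      · rintro ⟨h0, hrest⟩
        refine ⟨h0, ?_⟩
        rintro r (rfl | hr) hri
        · exact absurd hri hq
        · exact hrest r hr hri
      · rintro ⟨h0, hall⟩
        exact ⟨h0, fun r hr hri => hall r (Or.inr hr) hri⟩

theorem fold_max_ge (l : List (Int × List Char)) (i : Int) (w : List Char) (m0 : Int) :
    m0 ≤ l.foldl (fun m q => if q.1 ≠ i then max m ((lcp w q.2 : Int)) else m) m0 := by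
  by_contra h
  have h2 := (fold_max_lt l i w m0 m0).mp (lt_of_not_ge h)
  exact absurd h2.1 (lt_irrefl m0)

-- the uniqueness test of A at level t+1 is exactly "max-lcp < t+1" of B
theorem unique_iff_max_lt (ws : List (List Char)) (i : Nat) (hi : i < ws.length)
    (w : List Char) (hw : ws[i] = w) (t : Nat) (ht : t < w.length) :
    (((buildDict ws).getD (PySem.List.slice w none (some ((t : Int) + 1))) []).length = 1 ↔
      (PySem.List.enumerate ws).foldl
        (fun m q => if q.1 ≠ (i : Int) then max m ((lcp w q.2 : Int)) else m) 0 < (t : Int) + 1) := by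
  have hk : t + 1 ≤ w.length := by omega
  have hp : w.take (t + 1) ≠ [] := by
    have hlen : (w.take (t + 1)).length = t + 1 := by rw [List.length_take]; omega
    intro h
    rw [h] at hlen
    simp at hlen
  rw [slice_succ, build_getD ws (w.take (t + 1)) hp, fold_max_lt]
  have hself : (w.take (t + 1)).isPrefixOf (ws[i]) = true := by
    rw [hw, take_isPrefixOf_iff w w (t + 1) hk]
    rw [le_lcp_iff w w (t + 1) hk]
  rw [filter_length_one_iff ws _ i hi hself]
  constructor
  · intro h
    refine ⟨by positivity, ?_⟩
    rintro q hq hqi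
    rcases (PySem.List.mem_enumerate_iff _ _ _).mp hq with ⟨j, hj, rfl⟩
    have hqi' : (j : Int) ≠ (i : Int) := by simpa using hqi
    have hji : j ≠ i := fun hji => hqi' (by rw [hji])
    have hfalse := h j hj hji
    show (lcp w ws[j] : Int) < (t : Int) + 1
    have : ¬ ((t : Int) + 1 ≤ (lcp w ws[j] : Int)) := by
      intro hle
      have : t + 1 ≤ lcp w ws[j] := by exact_mod_cast hle
      rw [← take_isPrefixOf_iff w ws[j] (t + 1) hk] at this
      rw [this] at hfalse
      exact Bool.noConfusion hfalse
    omega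
  · rintro ⟨-, h⟩ j hj hji
    have hmem : ((j : Int), ws[j]) ∈ PySem.List.enumerate ws :=
      (PySem.List.mem_enumerate_iff _ _ _).mpr ⟨j, hj, by simp⟩
    have hlt : (lcp w ws[j] : Int) < (t : Int) + 1 :=
      h _ hmem (by show (j : Int) ≠ (i : Int); exact_mod_cast hji)
    by_contra hPc
    have hPt : (w.take (t + 1)).isPrefixOf ws[j] = true := by
      cases hb : (w.take (t + 1)).isPrefixOf ws[j]
      · exact absurd hb hPc
      · rfl
    rw [take_isPrefixOf_iff w ws[j] (t + 1) hk] at hPt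
    have : ((t : Int) + 1) ≤ (lcp w ws[j] : Int) := by exact_mod_cast hPt
    omega

-- A's break/else scan equals min(len w, M+1)
theorem aLoop_eq (ws : List (List Char)) (i : Nat) (hi : i < ws.length) (w : List Char)
    (hw : ws[i] = w) (M : Int)
    (hM : M = (PySem.List.enumerate ws).foldl
        (fun m q => if q.1 ≠ (i : Int) then max m ((lcp w q.2 : Int)) else m) 0) :
    ∀ t, t ≤ w.length → (t : Int) ≤ M →
      aLoop (buildDict ws) w t = min ((w.length : Int)) (M + 1) := by
  intro t
  induction ht : w.length - t generalizing t with
  | zero =>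
    intro htle hMt
    have : t = w.length := by omega
    subst this
    rw [aLoop, if_neg (lt_irrefl _)]
    omega
  | succ n ih =>
    intro htle hMt
    have htlt : t < w.length := by omega
    rw [aLoop, if_pos htlt]
    by_cases hone : ((buildDict ws).getD (PySem.List.slice w none (some ((t : Int) + 1))) []).length = 1
    · have := (unique_iff_max_lt ws i hi w hw t htlt).mp hone
      rw [← hM] at this
      have hMeq : M = (t : Int) := by omega
      rw [if_pos hone, hMeq]
      have : (t : Int) + 1 ≤ (w.length : Int) := by exact_mod_cast htlt
      omega
    · rw [if_neg hone]
      have hgt := (unique_iff_max_lt ws i hi w hw t htlt).not.mp hone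
      rw [← hM] at hgt
      have : (t : Int) + 1 ≤ M := by omega
      exact ih (t + 1) (by omega) (by omega) (by push_cast; omega)

theorem solution_eq (words : List String) : solution words = solution_alt words := by
  unfold solution solution_alt
  set ws := words.map String.toList with hws
  rw [show ws.foldl (fun total w => total + aLoop (buildDict ws) w 0) 0
      = ((PySem.List.enumerate ws).map (fun q => q.2)).foldl
          (fun total w => total + aLoop (buildDict ws) w 0) 0 by
    rw [PySem.List.map_snd_enumerate]]
  rw [List.foldl_map]
  apply PySem.List.foldl_congr_mem
  intro acc q hq
  rcases (PySem.List.mem_enumerate_iff _ _ _).mp hq with ⟨j, hj, rfl⟩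
  show acc + aLoop (buildDict ws) ws[j] 0 = acc +
      min ((ws[j].length : Int))
        ((PySem.List.enumerate ws).foldl
          (fun m q => if q.1 ≠ (0 + (j : Int)) then max m ((lcp ws[j] q.2 : Int)) else m) 0 + 1)
  rw [show ((0 : Int) + (j : Int)) = (j : Int) by ring]
  congr 1
  exact aLoop_eq ws j hj ws[j] rfl _ rfl 0 (Nat.zero_le _) (by exact_mod_cast fold_max_ge _ _ _ 0)

-- ===== VERDICT (by name: the statement is the Claim_ definition above) =====
theorem solution_spec : Claim_equal_solution := by
  intro words _
  unfold Spec_solution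
  exact solution_eq words
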